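-- pv_equiv track=rewrite | github.com/jero98772/my_good_site | core/tools/webUtils.py | fechaStr2Arr
-- ===== SOURCE A (Python) =====
-- def fechaStr2Arr(fecha):
-- 	"""
-- 	fechaStr2Arr(<date as string>) , return date as array
-- 	convert date to array
-- 	"""
-- 	fechaArr = []
-- 	tmp = ""
-- 	for i in str(fecha):
-- 		if i == "," or i == "-" or i == ":" or i =="/":
-- 			fechaArr.append(tmp)
-- 			tmp = ""
-- 		else :
-- 			tmp += i
-- 	else:
-- 		fechaArr.append(tmp)
-- 	return fechaArr
-- ===== SOURCE B (Python) =====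
-- import re
--
-- def fechaStr2Arr(fecha):
--     """
--     fechaStr2Arr(<date as string>) , return date as array
--     convert date to array
--     """
--     return re.split(r"[,\-:/]", str(fecha))
-- ===== Notes on version B (the rewrite author's own statement) =====
-- stated objective: idiomatic
-- what changed: Replaced the manual character-accumulation loop with a running buffer by a single re.split on the delimiter class [,\-:/].
import Mathlib
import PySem

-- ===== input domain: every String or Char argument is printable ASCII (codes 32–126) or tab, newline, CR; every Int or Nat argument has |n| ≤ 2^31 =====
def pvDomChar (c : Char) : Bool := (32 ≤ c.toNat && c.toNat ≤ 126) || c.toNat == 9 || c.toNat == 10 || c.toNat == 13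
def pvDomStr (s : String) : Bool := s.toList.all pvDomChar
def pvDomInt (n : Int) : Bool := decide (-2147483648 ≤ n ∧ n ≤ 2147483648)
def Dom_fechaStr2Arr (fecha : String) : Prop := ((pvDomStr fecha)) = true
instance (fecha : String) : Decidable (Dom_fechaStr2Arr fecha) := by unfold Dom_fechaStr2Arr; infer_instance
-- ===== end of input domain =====

-- B replaces A's manual character-accumulation loop by a delimiter-class split (re.split in Python,
-- a direct recursive splitter in the port); same return value, same cost.


-- ===== PORT A =====
-- A: loop over the characters keeping (fechaArr, tmp); on a delimiter flush tmp, else extend it;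
-- the for/else flushes the final tmp.
def fechaStr2ArrStep (st : List String × List Char) (c : Char) : List String × List Char :=
  if c = ',' ∨ c = '-' ∨ c = ':' ∨ c = '/' then (st.1 ++ [String.ofList st.2], [])
  else (st.1, st.2 ++ [c])

def fechaStr2Arr (fecha : String) : List String :=
  let st := fecha.toList.foldl fechaStr2ArrStep ([], [])
  st.1 ++ [String.ofList st.2]

-- ===== PORT B =====
-- B: re.split on the class [,\-:/], ported as the corresponding recursive split on the char list.
def pvIsDelim (c : Char) : Bool := c = ',' || c = '-' || c = ':' || c = '/'

def pvSplitDelims : List Char → List String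
  | [] => [""]
  | c :: cs =>
    if pvIsDelim c then "" :: pvSplitDelims cs
    else
      match pvSplitDelims cs with
      | [] => [String.ofList [c]]
      | t :: ts => String.ofList (c :: t.toList) :: ts

def fechaStr2Arr_alt (fecha : String) : List String :=
  pvSplitDelims fecha.toList

-- ===== PRECONDITION & SPEC =====
def Spec_fechaStr2Arr (fecha : String) (out : List String) : Prop := out = fechaStr2Arr_alt fecha
instance (fecha : String) (out : List String) : Decidable (Spec_fechaStr2Arr fecha out) := by unfold Spec_fechaStr2Arr; infer_instance

-- ===== CLAIM (what is proved, stated in full; the proofs are below) =====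
def Claim_equal_fechaStr2Arr : Prop := ∀ (fecha : String), Dom_fechaStr2Arr fecha → Spec_fechaStr2Arr fecha (fechaStr2Arr fecha)

-- ===== LEMMAS AND PROOFS =====
theorem pvSplitDelims_ne_nil (cs : List Char) : pvSplitDelims cs ≠ [] := by
  cases cs with
  | nil => simp [pvSplitDelims]
  | cons c cs =>
    simp only [pvSplitDelims]
    split
    · simp
    · split <;> simp

-- Loop invariant: flushing the loop state (acc, tmp) after processing cs equals
-- acc followed by the split of cs with tmp prepended to its first token.
theorem fechaStr2Arr_key (cs : List Char) (acc : List String) (tmp : List Char) :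
    (cs.foldl fechaStr2ArrStep (acc, tmp)).1 ++ [String.ofList (cs.foldl fechaStr2ArrStep (acc, tmp)).2]
    = acc ++ (match pvSplitDelims cs with
              | [] => []
              | t :: ts => String.ofList (tmp ++ t.toList) :: ts) := by
  induction cs generalizing acc tmp with
  | nil => simp [pvSplitDelims]
  | cons c cs ih =>
    by_cases h : c = ',' ∨ c = '-' ∨ c = ':' ∨ c = '/'
    · have hd : pvIsDelim c = true := by
        rcases h with h | h | h | h <;> simp [pvIsDelim, h]
      simp only [List.foldl_cons, fechaStr2ArrStep, if_pos h, pvSplitDelims, hd, if_true]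
      rw [ih]
      rcases he : pvSplitDelims cs with _ | ⟨t, ts⟩
      · exact absurd he (pvSplitDelims_ne_nil cs)
      · simp
    · have hd : pvIsDelim c = false := by
        simp only [pvIsDelim, Bool.or_eq_false_iff, decide_eq_false_iff_not]
        push Not at h
        tauto
      simp only [List.foldl_cons, fechaStr2ArrStep, if_neg h, pvSplitDelims, hd]
      rw [ih]
      rcases he : pvSplitDelims cs with _ | ⟨t, ts⟩
      · exact absurd he (pvSplitDelims_ne_nil cs)
      · simp

-- ===== VERDICT (by name: the statement is the Claim_ definition above) =====
theorem fechaStr2Arr_spec : Claim_equal_fechaStr2Arr := by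
  intro fecha _
  show fechaStr2Arr fecha = fechaStr2Arr_alt fecha
  unfold fechaStr2Arr fechaStr2Arr_alt
  rw [fechaStr2Arr_key]
  rcases he : pvSplitDelims fecha.toList with _ | ⟨t, ts⟩
  · exact absurd he (pvSplitDelims_ne_nil fecha.toList)
  · simp
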